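-- pv_equiv track=rewrite | github.com/omarkhaled-auto/agent-team-v18 | src/agent_team_v15/quality_validators.py | _route_has_unnamed_wildcard
-- ===== SOURCE A (Python) =====
-- def _route_has_unnamed_wildcard(route: str) -> bool:
--     route_text = str(route or "")
--     for index, char in enumerate(route_text):
--         if char != "*":
--             continue
--         next_char = route_text[index + 1] if index + 1 < len(route_text) else ""
--         if not (next_char.isalpha() or next_char == "_"):
--             return True
--     return False
-- ===== SOURCE B (Python) =====
-- def _route_has_unnamed_wildcard(route: str) -> bool:
--     segments = str(route or "").split("*")
--     for seg in segments[1:]: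
--         nxt = seg[0] if seg else ""
--         if not (nxt.isalpha() or nxt == "_"):
--             return True
--     return False
-- ===== Notes on version B (the rewrite author's own statement) =====
-- stated objective: faster
-- what changed: Replaces A's per-character indexed scan with one str.split on the wildcard character followed by a scan that tests only the first character of each segment after a star.
import Mathlib
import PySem

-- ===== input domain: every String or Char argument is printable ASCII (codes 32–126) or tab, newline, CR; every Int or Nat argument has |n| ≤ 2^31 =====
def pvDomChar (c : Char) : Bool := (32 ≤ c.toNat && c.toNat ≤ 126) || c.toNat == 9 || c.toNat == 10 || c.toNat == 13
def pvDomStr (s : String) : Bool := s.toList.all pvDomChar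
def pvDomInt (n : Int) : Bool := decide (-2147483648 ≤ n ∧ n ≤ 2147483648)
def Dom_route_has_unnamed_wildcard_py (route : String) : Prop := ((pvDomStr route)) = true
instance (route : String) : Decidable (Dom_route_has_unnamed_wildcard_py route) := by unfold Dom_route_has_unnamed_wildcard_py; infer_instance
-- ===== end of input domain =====

-- B replaces A's indexed character scan by split-on-"*" then a scan of the segments
-- after each star (objective: alternative decomposition, same linear cost).


-- ===== PORT A =====
-- the for-loop over enumerate(route_text): at each char, if it is '*', peek the
-- next char (exists ↔ index+1 < len; else next_char = "", never alpha nor '_')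
def pvA_loop : List Char → Bool
  | [] => false
  | c :: rest =>
    if c = '*' then
      match rest with
      | [] => true  -- next_char = "" → not (isalpha ∨ '_') → return True
      | d :: _ => if !(PySem.Chars.isalpha d || d = '_') then true else pvA_loop rest
    else pvA_loop rest

-- str(route or "") = route for a str argument (empty string is falsy and yields "")
def route_has_unnamed_wildcard_py (route : String) : Bool := pvA_loop route.toList

-- ===== PORT B =====
-- nxt = seg[0] if seg else ""; not (nxt.isalpha() or nxt == "_")
def pvB_pred (seg : List Char) : Bool :=
  match seg with
  | [] => true
  | d :: _ => !(PySem.Chars.isalpha d || d = '_')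

-- segments = route.split("*") (sep nonempty, exact); scan segments[1:]
def route_has_unnamed_wildcard_py_alt (route : String) : Bool :=
  ((PySem.Chars.splitOn route.toList ['*']).drop 1).any pvB_pred

-- ===== PRECONDITION & SPEC =====
def Spec_route_has_unnamed_wildcard_py (route : String) (out : Bool) : Prop := out = route_has_unnamed_wildcard_py_alt route
instance (route : String) (out : Bool) : Decidable (Spec_route_has_unnamed_wildcard_py route out) := by unfold Spec_route_has_unnamed_wildcard_py; infer_instance

-- ===== CLAIM (what is proved, stated in full; the proofs are below) =====
def Claim_equal_route_has_unnamed_wildcard_py : Prop := ∀ (route : String), Dom_route_has_unnamed_wildcard_py route → Spec_route_has_unnamed_wildcard_py route (route_has_unnamed_wildcard_py route)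

-- ===== LEMMAS AND PROOFS =====

-- structural model of splitOn on separator ['*']
def pvSplit (cur : List Char) : List Char → List (List Char)
  | [] => [cur.reverse]
  | c :: rest => if c = '*' then cur.reverse :: pvSplit [] rest else pvSplit (c :: cur) rest

-- first segment tail (chars of cs up to the first star)
def pvFirst : List Char → List Char
  | [] => []
  | c :: rest => if c = '*' then [] else c :: pvFirst rest

-- the segments strictly after the first star
def pvTail : List Char → List (List Char)
  | [] => []
  | c :: rest => if c = '*' then pvSplit [] rest else pvTail rest

theorem pvSplit_eq (cs : List Char) : ∀ (cur : List Char),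
    pvSplit cur cs = (cur.reverse ++ pvFirst cs) :: pvTail cs := by
  induction cs with
  | nil => intro cur; simp [pvSplit, pvFirst, pvTail]
  | cons c rest ih =>
    intro cur
    by_cases h : c = '*' <;> simp [pvSplit, pvFirst, pvTail, h, ih]

theorem pvGo_eq (cs : List Char) : ∀ (fuel : Nat) (cur : List Char) (acc : List (List Char)),
    cs.length ≤ fuel →
    PySem.Chars.splitOn.go ['*'] fuel cs cur acc = acc.reverse ++ pvSplit cur cs := by
  induction cs with
  | nil =>
    intro fuel cur acc _
    match fuel with
    | 0 => simp [PySem.Chars.splitOn.go, pvSplit]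
    | n + 1 =>
      show (cur.reverse :: acc).reverse = acc.reverse ++ pvSplit cur []
      simp [pvSplit]
  | cons c rest ih =>
    intro fuel cur acc hle
    match fuel with
    | 0 => simp at hle
    | n + 1 =>
      have hrest : rest.length ≤ n := by simpa using hle
      show (if ['*'].isPrefixOf (c :: rest) then
              PySem.Chars.splitOn.go ['*'] n (List.drop 1 (c :: rest)) [] (cur.reverse :: acc)
            else PySem.Chars.splitOn.go ['*'] n rest (c :: cur) acc)
          = acc.reverse ++ pvSplit cur (c :: rest)
      by_cases h : c = '*'
      · simp [List.isPrefixOf, h, ih n [] (cur.reverse :: acc) hrest, pvSplit]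
      · simp [List.isPrefixOf, h, Ne.symm h, ih n (c :: cur) acc hrest, pvSplit]

theorem pvSplitOn_eq (cs : List Char) : PySem.Chars.splitOn cs ['*'] = pvSplit [] cs := by
  show PySem.Chars.splitOn.go ['*'] (cs.length + 1) cs [] [] = pvSplit [] cs
  simpa using pvGo_eq cs (cs.length + 1) [] [] (by omega)

theorem pvTail_eq (cs : List Char) : ∀ (cur : List Char),
    (pvSplit cur cs).drop 1 = pvTail cs := by
  intro cur; rw [pvSplit_eq]; rfl

theorem pvTail_any (cs : List Char) : (pvTail cs).any pvB_pred = pvA_loop cs := by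
  induction cs with
  | nil => rfl
  | cons c rest ih =>
    by_cases h : c = '*'
    · subst h
      show (pvSplit [] rest).any pvB_pred = pvA_loop ('*' :: rest)
      rw [pvSplit_eq]
      match rest with
      | [] => rfl
      | d :: r =>
        by_cases hd : d = '*'
        · subst hd
          simp [pvFirst, pvA_loop, pvB_pred, PySem.Chars.isalpha, PySem.Chars.isupper,
            PySem.Chars.islower]
        · by_cases hp : (!(PySem.Chars.isalpha d || d = '_')) = true
          · simp [pvFirst, hd, pvA_loop, pvB_pred, hp]
          · simp only [Bool.not_eq_true] at hp
            have ih' : (pvTail r).any pvB_pred = pvA_loop r := by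
              simpa [pvTail, pvA_loop, hd] using ih
            simp [pvFirst, hd, pvA_loop, pvB_pred, hp, pvTail, ih']
    · simp [pvTail, pvA_loop, h, ih]

-- ===== VERDICT (by name: the statement is the Claim_ definition above) =====
theorem route_has_unnamed_wildcard_py_spec : Claim_equal_route_has_unnamed_wildcard_py := by
  intro route _
  show route_has_unnamed_wildcard_py route = route_has_unnamed_wildcard_py_alt route
  rw [route_has_unnamed_wildcard_py, route_has_unnamed_wildcard_py_alt, pvSplitOn_eq,
    pvTail_eq _ [], pvTail_any]
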